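-- pv_equiv track=rewrite | github.com/cvalbz/adventofcode_2017 | day_24.py | valid_bridges
-- ===== SOURCE A (Python) =====
-- def match_tube(size, tube):
--     return size == tube[0] or size == tube[1]
--
-- def get_other_end(size, tube):
--     return tube[0] if size == tube[1] else tube[1]
--
-- def valid_bridges(start, tubes):
--     if len(tubes) == 0:
--         return []
--
--     possible_tubes = [tube for tube in tubes if match_tube(start, tube)]
--     if len(possible_tubes) == 0:
--         return []
--
--     bridges = []
--     for tube in possible_tubes:
--         tubes_left = tubes[:]
--         tubes_left.remove(tube)
--
--         bridges.append( [tube] )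
--         for b in valid_bridges(get_other_end(start, tube), tubes_left):
--             bridges.append([tube] + b)
--
--     return bridges
-- ===== SOURCE B (Python) =====
-- def match_tube(size, tube):
--     return size == tube[0] or size == tube[1]
--
-- def get_other_end(size, tube):
--     return tube[0] if size == tube[1] else tube[1]
--
-- def _children(path, end, remaining):
--     # extended states for every tube of `remaining` matching `end` (first equal copy removed)
--     states = []
--     for tube in [t for t in remaining if match_tube(end, t)]:
--         rem2 = remaining[:]
--         rem2.remove(tube)
--         states.append((path + [tube], get_other_end(end, tube), rem2))
--     return states
--
-- def valid_bridges(start, tubes):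
--     # iterative DFS with an explicit stack; pre-order over bridges, no recursion
--     result = []
--     stack = []
--     for state in reversed(_children([], start, tubes)):
--         stack.append(state)
--     while stack:
--         path, end, remaining = stack.pop()
--         result.append(path)
--         for state in reversed(_children(path, end, remaining)):
--             stack.append(state)
--     return result
-- ===== Notes on version B (the rewrite author's own statement) =====
-- stated objective: alternative
-- what changed: Replaces A's recursive enumeration with an iterative DFS over an explicit stack of (path, current-end, remaining-tubes) states that emits each popped path and pushes the extended states in reverse, reproducing A's pre-order output without recursion.
import Mathlib
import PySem

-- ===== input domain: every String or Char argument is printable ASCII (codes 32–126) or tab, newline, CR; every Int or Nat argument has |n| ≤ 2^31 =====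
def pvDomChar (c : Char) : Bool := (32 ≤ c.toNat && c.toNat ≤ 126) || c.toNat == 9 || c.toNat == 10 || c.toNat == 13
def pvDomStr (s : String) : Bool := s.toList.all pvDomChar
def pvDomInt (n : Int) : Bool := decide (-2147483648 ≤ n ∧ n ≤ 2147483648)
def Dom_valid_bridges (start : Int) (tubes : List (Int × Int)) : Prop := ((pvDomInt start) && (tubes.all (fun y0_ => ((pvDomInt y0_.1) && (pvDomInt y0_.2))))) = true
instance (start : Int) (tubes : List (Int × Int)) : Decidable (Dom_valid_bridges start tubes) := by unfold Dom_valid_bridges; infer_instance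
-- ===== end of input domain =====

-- B replaces A's recursion by an explicit-stack iterative DFS (same pre-order output); objective: alternative decomposition, not speed.

-- ===== PORT A =====
def match_tube (size : Int) (tube : Int × Int) : Bool :=
  size == tube.1 || size == tube.2

def get_other_end (size : Int) (tube : Int × Int) : Int :=
  if size == tube.2 then tube.1 else tube.2

-- used by the termination proofs of both ports
theorem remove?_some_length {xs l : List (Int × Int)} {v : Int × Int}
    (h : PySem.List.remove? xs v = some l) : l.length < xs.length := by
  have hv : v ∈ xs := by
    by_contra hv
    rw [(PySem.List.remove?_eq_none_iff xs v).mpr hv] at h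
    simp at h
  rw [PySem.List.remove?_eq_some_erase xs v hv] at h
  injection h with h'
  subst h'
  rw [List.length_erase_of_mem hv]
  exact Nat.sub_lt (List.length_pos_of_mem hv) one_pos

mutual
-- the 'for tube in possible_tubes' loop of A, as structural recursion over possible_tubes
def vbFor (start : Int) (tubes : List (Int × Int)) (possible : List (Int × Int))
    (bridges : List (List (Int × Int))) : List (List (Int × Int)) :=
  match possible with
  | [] => bridges
  | tube :: rest =>
    match h : PySem.List.remove? tubes tube with
    | none => vbFor start tubes rest bridges  -- unreachable: every tube of possible_tubes is in tubes
    | some tubes_left =>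
      vbFor start tubes rest
        ((bridges ++ [[tube]])
          ++ (valid_bridges (get_other_end start tube) tubes_left).map (fun b => [tube] ++ b))
  termination_by (tubes.length, possible.length)
  decreasing_by
  · exact Prod.Lex.right _ (Nat.lt_succ_self _)
  · exact Prod.Lex.left _ _ (remove?_some_length h)
  · exact Prod.Lex.right _ (Nat.lt_succ_self _)

def valid_bridges (start : Int) (tubes : List (Int × Int)) : List (List (Int × Int)) :=
  if tubes.length == 0 then [] else
  let possible_tubes := tubes.filter (fun tube => match_tube start tube)
  if possible_tubes.length == 0 then [] else
  vbFor start tubes possible_tubes []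
  termination_by (tubes.length, tubes.length + 1)
  decreasing_by
    apply Prod.Lex.right
    simp only [List.length_unattach]
    exact Nat.lt_succ_of_le (le_trans (List.length_filter_le _ _) (by simp))
end

-- ===== PORT B =====
-- _children of Source B; 'remaining.remove(tube)' always succeeds (tube ∈ remaining), .getD is only a totality default
def vbChildren (path : List (Int × Int)) (end_ : Int) (remaining : List (Int × Int)) :
    List (List (Int × Int) × Int × List (Int × Int)) :=
  (remaining.filter (fun t => match_tube end_ t)).map
    (fun tube => (path ++ [tube], get_other_end end_ tube, (PySem.List.remove? remaining tube).getD remaining))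

-- needed by vbLoop's termination proof
theorem vbChildren_weight (path : List (Int × Int)) (end_ : Int) (remaining : List (Int × Int)) :
    ((vbChildren path end_ remaining).map (fun s => Nat.factorial (s.2.2.length + 1))).sum
      < Nat.factorial (remaining.length + 1) := by
  have hbound : ∀ x ∈ (vbChildren path end_ remaining).map (fun s => Nat.factorial (s.2.2.length + 1)),
      x ≤ Nat.factorial remaining.length := by
    intro x hx
    simp only [vbChildren, List.map_map, List.mem_map, Function.comp] at hx
    obtain ⟨t, ht, rfl⟩ := hx
    have htm : t ∈ remaining := (List.mem_filter.mp ht).1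
    rw [PySem.List.remove?_eq_some_erase remaining t htm]
    simp only [Option.getD_some]
    rw [List.length_erase_of_mem htm,
      Nat.sub_add_cancel (List.length_pos_of_mem htm)]
  calc ((vbChildren path end_ remaining).map (fun s => Nat.factorial (s.2.2.length + 1))).sum
      ≤ ((vbChildren path end_ remaining).map (fun s => Nat.factorial (s.2.2.length + 1))).length
          * Nat.factorial remaining.length := by
        simpa using List.sum_le_card_nsmul _ _ hbound
    _ ≤ remaining.length * Nat.factorial remaining.length := by
        apply Nat.mul_le_mul_right
        simp [vbChildren, List.length_filter_le]
    _ < (remaining.length + 1) * Nat.factorial remaining.length :=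
        (Nat.mul_lt_mul_right (Nat.factorial_pos _)).mpr (Nat.lt_succ_self _)
    _ = Nat.factorial (remaining.length + 1) := (Nat.factorial_succ _).symm

-- the 'while stack' loop of Source B; head of the list = top of the stack
def vbLoop (stack : List (List (Int × Int) × Int × List (Int × Int)))
    (result : List (List (Int × Int))) : List (List (Int × Int)) :=
  match stack with
  | [] => result
  | (path, end_, remaining) :: rest =>
      vbLoop (vbChildren path end_ remaining ++ rest) (result ++ [path])
  termination_by (stack.map (fun s => Nat.factorial (s.2.2.length + 1))).sum
  decreasing_by
    simp only [List.map_append, List.sum_append, List.map_cons, List.sum_cons]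
    have := vbChildren_weight path end_ remaining
    omega

def valid_bridges_alt (start : Int) (tubes : List (Int × Int)) : List (List (Int × Int)) :=
  vbLoop (vbChildren [] start tubes) []

-- ===== PRECONDITION & SPEC =====
def Spec_valid_bridges (start : Int) (tubes : List (Int × Int)) (out : List (List (Int × Int))) : Prop := out = valid_bridges_alt start tubes
instance (start : Int) (tubes : List (Int × Int)) (out : List (List (Int × Int))) : Decidable (Spec_valid_bridges start tubes out) := by unfold Spec_valid_bridges; infer_instance

-- ===== CLAIM (what is proved, stated in full; the proofs are below) =====
def Claim_equal_valid_bridges : Prop := ∀ (start : Int) (tubes : List (Int × Int)), Dom_valid_bridges start tubes → Spec_valid_bridges start tubes (valid_bridges start tubes)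

-- ===== LEMMAS AND PROOFS =====

theorem remove?_getD_erase (xs : List (Int × Int)) (v : Int × Int) :
    (PySem.List.remove? xs v).getD xs = xs.erase v := by
  by_cases hv : v ∈ xs
  · rw [PySem.List.remove?_eq_some_erase xs v hv]; rfl
  · rw [(PySem.List.remove?_eq_none_iff xs v).mpr hv, List.erase_of_not_mem hv]; rfl

theorem vbFor_eq (start : Int) (tubes : List (Int × Int)) :
    ∀ (possible : List (Int × Int)) (acc : List (List (Int × Int))),
    (∀ t ∈ possible, t ∈ tubes) →
    vbFor start tubes possible acc
      = acc ++ possible.flatMap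
          (fun t => [t] :: (valid_bridges (get_other_end start t) (tubes.erase t)).map (fun b => [t] ++ b)) := by
  intro possible
  induction possible with
  | nil => intro acc _; rw [vbFor.eq_def]; simp
  | cons tube rest ih =>
    intro acc hmem
    have ht : tube ∈ tubes := hmem tube (List.mem_cons_self ..)
    rw [vbFor.eq_def]
    dsimp only
    split
    · next heq =>
        rw [PySem.List.remove?_eq_some_erase tubes tube ht] at heq
        simp at heq
    · next tubes_left heq =>
        rw [PySem.List.remove?_eq_some_erase tubes tube ht] at heq
        injection heq with heq'
        subst heq'
        rw [ih _ (fun t hti => hmem t (List.mem_cons_of_mem _ hti))]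
        simp [List.flatMap_cons, List.append_assoc]

-- A's result as one flatMap over the matching tubes
theorem valid_bridges_char (e : Int) (r : List (Int × Int)) :
    valid_bridges e r
      = (r.filter (fun t => match_tube e t)).flatMap
          (fun t => [t] :: (valid_bridges (get_other_end e t) (r.erase t)).map (fun b => [t] ++ b)) := by
  rw [valid_bridges.eq_def]
  by_cases h0 : r.length = 0
  · have : r = [] := List.length_eq_zero_iff.mp h0
    subst this; simp
  · simp only [beq_iff_eq, h0, if_false]
    by_cases h1 : (r.filter (fun t => match_tube e t)).length = 0
    · have : r.filter (fun t => match_tube e t) = [] := List.length_eq_zero_iff.mp h1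
      simp [this]
    · simp only [h1, if_false]
      rw [vbFor_eq e r _ [] (fun t hti => (List.mem_filter.mp hti).1)]
      simp

-- what one popped state contributes: its path, then A's bridges from its end, each prefixed
theorem vbChildren_flatMap (p : List (Int × Int)) (e : Int) (r : List (Int × Int)) :
    (vbChildren p e r).flatMap
        (fun s => s.1 :: (valid_bridges s.2.1 s.2.2).map (fun b => s.1 ++ b))
      = (valid_bridges e r).map (fun b => p ++ b) := by
  rw [valid_bridges_char, List.map_flatMap]
  unfold vbChildren
  rw [List.flatMap_map]
  apply List.flatMap_congr
  intro t _
  simp [remove?_getD_erase, Function.comp, List.map_map, List.append_assoc]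

theorem vbLoop_eq (stack : List (List (Int × Int) × Int × List (Int × Int)))
    (result : List (List (Int × Int))) :
    vbLoop stack result
      = result ++ stack.flatMap (fun s => s.1 :: (valid_bridges s.2.1 s.2.2).map (fun b => s.1 ++ b)) := by
  fun_induction vbLoop stack result with
  | case1 result => simp
  | case2 result path end_ remaining rest ih =>
    rw [ih]
    simp only [List.flatMap_append, List.flatMap_cons, vbChildren_flatMap, List.append_assoc,
      List.cons_append, List.nil_append]

-- ===== VERDICT (by name: the statement is the Claim_ definition above) =====
theorem valid_bridges_spec : Claim_equal_valid_bridges := by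
  intro start tubes _
  unfold Spec_valid_bridges valid_bridges_alt
  rw [vbLoop_eq, vbChildren_flatMap]
  simp
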